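-- pv_equiv track=rewrite | github.com/LMCache/LMBench | 4-latest-results/post-processing/suite-workloads-visualization.py | extract_key_from_filename
-- ===== SOURCE A (Python) =====
-- def extract_key_from_filename(filename):
--     """Extract the baseline key from filename (first part before workload)."""
--     # Filename format: {baseline_key}_{workload}_{qps}_{timestamp}
--     parts = filename.split('_')
--     if len(parts) >= 2:
--         # Handle cases where baseline_key might contain underscores
--         # We'll take everything before the workload type
--         workload_types = ['synthetic', 'sharegpt', 'agentic', 'mooncake', 'random']
--
--         # Check for exact workload type matches first
--         for i, part in enumerate(parts):
--             if part in workload_types: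
--                 return '_'.join(parts[:i])
--
--         # Check for vllm workload patterns (vllm_dataset or vllm_dataset_path)
--         for i, part in enumerate(parts):
--             if part == 'vllm' and i + 1 < len(parts):
--                 # This is a vllm workload, return everything before 'vllm'
--                 return '_'.join(parts[:i])
--
--         # Fallback: assume first part is the key
--         return parts[0]
--     return 'unknown'
-- ===== SOURCE B (Python) =====
-- def extract_key_from_filename(filename):
--     """Extract the baseline key from filename (first part before workload)."""
--     parts = filename.split('_')
--     if len(parts) < 2:
--         return 'unknown'
--     workload_types = ('synthetic', 'sharegpt', 'agentic', 'mooncake', 'random')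
--     vllm_idx = None
--     for i, part in enumerate(parts):
--         if part in workload_types:
--             return '_'.join(parts[:i])
--         if vllm_idx is None and part == 'vllm' and i + 1 < len(parts):
--             vllm_idx = i
--     if vllm_idx is not None:
--         return '_'.join(parts[:vllm_idx])
--     return parts[0]
-- ===== Notes on version B (the rewrite author's own statement) =====
-- stated objective: alternative
-- what changed: A's two sequential full scans (first for an exact workload type, then a second scan for a 'vllm' marker) are fused into one single pass that returns immediately on a workload part and merely remembers the first qualifying 'vllm' index as a fallback used after the loop.
import Mathlib
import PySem

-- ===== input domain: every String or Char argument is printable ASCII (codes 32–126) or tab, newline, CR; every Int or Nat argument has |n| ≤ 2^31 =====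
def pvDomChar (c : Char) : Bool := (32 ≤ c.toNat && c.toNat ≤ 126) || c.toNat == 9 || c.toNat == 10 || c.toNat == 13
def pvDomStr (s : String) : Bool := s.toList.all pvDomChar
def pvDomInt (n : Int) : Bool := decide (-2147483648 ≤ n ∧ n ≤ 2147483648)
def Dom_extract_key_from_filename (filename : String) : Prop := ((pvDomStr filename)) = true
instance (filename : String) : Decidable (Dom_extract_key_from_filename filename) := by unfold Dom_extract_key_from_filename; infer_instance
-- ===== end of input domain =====

-- B fuses A's two sequential scans into one pass that remembers the first qualifying 'vllm'
-- index as a fallback; return values are proved equal on all inputs (A is total).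

-- ===== PORT A =====
def pvWorkloadTypes : List String := ["synthetic", "sharegpt", "agentic", "mooncake", "random"]

-- first loop of A: 'for i, part in enumerate(parts): if part in workload_types: return ...'
def pvLoop1 (parts : List String) : List String → Nat → Option String
  | [], _ => none
  | p :: rest, i =>
    if p ∈ pvWorkloadTypes then some (PySem.Str.join "_" (parts.take i))
    else pvLoop1 parts rest (i + 1)

-- second loop of A: 'for i, part in enumerate(parts): if part == "vllm" and i+1 < len(parts): return ...'
def pvLoop2 (parts : List String) : List String → Nat → Option String
  | [], _ => none
  | p :: rest, i =>
    if p = "vllm" ∧ i + 1 < parts.length then some (PySem.Str.join "_" (parts.take i))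
    else pvLoop2 parts rest (i + 1)

def extract_key_from_filename (filename : String) : String :=
  let parts := (PySem.Str.split? filename "_").getD []  -- sep = "_" ≠ "", so split? is never none
  if parts.length ≥ 2 then
    match pvLoop1 parts parts 0 with
    | some r => r
    | none =>
      match pvLoop2 parts parts 0 with
      | some r => r
      | none => parts.headD ""          -- parts[0]; parts ≠ [] since length ≥ 2
  else "unknown"

-- ===== PORT B =====
-- single pass: return on a workload part, remember the first qualifying 'vllm' index
def pvLoopB (parts : List String) : List String → Nat → Option Nat → String
  | [], _, vidx =>
    match vidx with
    | some v => PySem.Str.join "_" (parts.take v)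
    | none => parts.headD ""            -- parts[0]; guarded by length ≥ 2
  | p :: rest, i, vidx =>
    if p ∈ pvWorkloadTypes then PySem.Str.join "_" (parts.take i)
    else pvLoopB parts rest (i + 1)
      (if vidx = none ∧ p = "vllm" ∧ i + 1 < parts.length then some i else vidx)

def extract_key_from_filename_alt (filename : String) : String :=
  let parts := (PySem.Str.split? filename "_").getD []  -- sep = "_" ≠ "", so split? is never none
  if parts.length < 2 then "unknown"
  else pvLoopB parts parts 0 none

-- ===== PRECONDITION & SPEC =====
def Spec_extract_key_from_filename (filename : String) (out : String) : Prop := out = extract_key_from_filename_alt filename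
instance (filename : String) (out : String) : Decidable (Spec_extract_key_from_filename filename out) := by unfold Spec_extract_key_from_filename; infer_instance

-- ===== CLAIM (what is proved, stated in full; the proofs are below) =====
def Claim_equal_extract_key_from_filename : Prop := ∀ (filename : String), Dom_extract_key_from_filename filename → Spec_extract_key_from_filename filename (extract_key_from_filename filename)

-- ===== LEMMAS AND PROOFS =====

theorem pvLoopB_eq (parts : List String) (l : List String) :
    ∀ (i : Nat) (vidx : Option Nat),
      pvLoopB parts l i vidx =
        match pvLoop1 parts l i with
        | some r => r
        | none =>
          match vidx with
          | some v => PySem.Str.join "_" (parts.take v)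
          | none =>
            match pvLoop2 parts l i with
            | some r => r
            | none => parts.headD "" := by
  induction l with
  | nil => intro i vidx; simp [pvLoopB, pvLoop1, pvLoop2]
  | cons p rest ih =>
    intro i vidx
    by_cases hw : p ∈ pvWorkloadTypes
    · simp [pvLoopB, pvLoop1, hw]
    · by_cases hv : p = "vllm" ∧ i + 1 < parts.length
      · obtain ⟨hv1, hv2⟩ := hv
        subst hv1
        cases vidx with
        | none =>
          rw [show pvLoopB parts ("vllm" :: rest) i none = pvLoopB parts rest (i + 1) (some i) by
                simp [pvLoopB, hw, hv2], ih]
          cases h1 : pvLoop1 parts rest (i + 1) <;> simp [pvLoop1, pvLoop2, hw, hv2, h1]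
        | some v =>
          rw [show pvLoopB parts ("vllm" :: rest) i (some v) = pvLoopB parts rest (i + 1) (some v) by
                simp [pvLoopB, hw], ih]
          cases h1 : pvLoop1 parts rest (i + 1) <;> simp [pvLoop1, hw, h1]
      · cases vidx with
        | none =>
          rw [show pvLoopB parts (p :: rest) i none = pvLoopB parts rest (i + 1) none by
                simp [pvLoopB, hw, hv], ih]
          cases h1 : pvLoop1 parts rest (i + 1) <;> simp [pvLoop1, pvLoop2, hw, hv, h1]
        | some v =>
          rw [show pvLoopB parts (p :: rest) i (some v) = pvLoopB parts rest (i + 1) (some v) by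
                simp [pvLoopB, hw], ih]
          cases h1 : pvLoop1 parts rest (i + 1) <;> simp [pvLoop1, hw, h1]

-- ===== VERDICT (by name: the statement is the Claim_ definition above) =====
theorem extract_key_from_filename_spec : Claim_equal_extract_key_from_filename := by
  intro filename _
  unfold Spec_extract_key_from_filename extract_key_from_filename extract_key_from_filename_alt
  set parts := (PySem.Str.split? filename "_").getD [] with hp
  by_cases h : parts.length ≥ 2
  · have hlt : ¬ parts.length < 2 := by omega
    rw [if_pos h, if_neg hlt, pvLoopB_eq parts parts 0 none]
  · have hlt : parts.length < 2 := by omega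
    rw [if_neg h, if_pos hlt]
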